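-- pv_equiv track=rewrite | github.com/billsioros/kenken-python | src/kenken.py | conflicting
-- ===== SOURCE A (Python) =====
-- def RowXorCol(xy1, xy2):
--     """
--     Evaluates to true if the given positions are in the same row / column
--     but are in different columns / rows
--     """
--     return (xy1[0] == xy2[0]) != (xy1[1] == xy2[1])
--
-- def conflicting(A, a, B, b):
--     """
--     Evaluates to true if:
--       * there exists mA so that ma is a member of A and
--       * there exists mb so that mb is a member of B and
--       * RowXorCol(mA, mB) evaluates to true and
--       * the value of mA in 'assignment' a is equal to
--         the value of mb in 'assignment' b
--     """
--     for i in range(len(A)):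
--         for j in range(len(B)):
--             mA = A[i]
--             mB = B[j]
--
--             ma = a[i]
--             mb = b[j]
--             if RowXorCol(mA, mB) and ma == mb:
--                 return True
--
--     return False
-- ===== SOURCE B (Python) =====
-- def conflicting(A, a, B, b):
--     # Index B once: count occurrences of (value,row), (value,col) and (value,row,col).
--     triples = [(b[j], B[j][0], B[j][1]) for j in range(len(B))]
--     rows = {}
--     cols = {}
--     cells = {}
--     for t in triples:
--         v, x, y = t
--         rows[(v, x)] = rows.get((v, x), 0) + 1
--         cols[(v, y)] = cols.get((v, y), 0) + 1
--         cells[t] = cells.get(t, 0) + 1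
--     for i in range(len(A)):
--         v, x, y = a[i], A[i][0], A[i][1]
--         both = cells.get((v, x, y), 0)
--         if rows.get((v, x), 0) + cols.get((v, y), 0) - 2 * both > 0:
--             return True
--     return False
-- ===== Notes on version B (the rewrite author's own statement) =====
-- stated objective: alternative
-- what changed: Replaces the nested scan over all pairs (i,j) by a single pass that indexes B by (value,row), (value,col) and (value,row,col) counts in dictionaries, then checks each element of A with O(1) lookups (worst-case O(|A|+|B|) vs A's O(|A|*|B|), but A's early exit makes it comparable on typical inputs).
-- outside the precondition, e.g. on conflicting([(0, 9435, 2), (1,)], [], [], []): A returns False, B raises IndexError; on conflicting([(1,)], [0], [], []): A returns False, B raises IndexError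
import Mathlib
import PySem

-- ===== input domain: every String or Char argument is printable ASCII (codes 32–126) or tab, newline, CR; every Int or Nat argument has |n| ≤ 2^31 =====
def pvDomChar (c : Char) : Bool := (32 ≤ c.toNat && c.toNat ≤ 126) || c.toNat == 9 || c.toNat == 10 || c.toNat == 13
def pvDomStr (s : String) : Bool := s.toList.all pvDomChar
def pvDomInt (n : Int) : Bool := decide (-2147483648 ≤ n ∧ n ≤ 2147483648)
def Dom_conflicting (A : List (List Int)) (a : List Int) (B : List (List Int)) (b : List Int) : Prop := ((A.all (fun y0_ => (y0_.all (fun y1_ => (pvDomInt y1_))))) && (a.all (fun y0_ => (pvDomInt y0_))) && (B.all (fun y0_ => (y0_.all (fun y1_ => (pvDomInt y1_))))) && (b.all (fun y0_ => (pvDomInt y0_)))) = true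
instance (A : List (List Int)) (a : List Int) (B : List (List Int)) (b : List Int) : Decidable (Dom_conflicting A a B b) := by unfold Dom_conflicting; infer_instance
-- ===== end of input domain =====

-- B replaces A's nested all-pairs scan by a single pass that indexes B with
-- (value,row)/(value,col)/(value,row,col) count dictionaries, then checks each A element by lookups.

-- ===== PORT A =====
def RowXorColPort (xy1 xy2 : List Int) : Bool :=
  ((PySem.List.pyGetD xy1 0 0) == (PySem.List.pyGetD xy2 0 0))
    != ((PySem.List.pyGetD xy1 1 0) == (PySem.List.pyGetD xy2 1 0))

def conflicting (A : List (List Int)) (a : List Int) (B : List (List Int)) (b : List Int) : Bool :=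
  (List.range A.length).any (fun i =>
    (List.range B.length).any (fun j =>
      let mA := PySem.List.pyGetD A (i : Int) []
      let mB := PySem.List.pyGetD B (j : Int) []
      let ma := PySem.List.pyGetD a (i : Int) 0
      let mb := PySem.List.pyGetD b (j : Int) 0
      RowXorColPort mA mB && ma == mb))

-- ===== PORT B =====
def conflicting_alt (A : List (List Int)) (a : List Int) (B : List (List Int)) (b : List Int) : Bool :=
  let triples := (List.range B.length).map (fun (j : Nat) =>
    let cell := PySem.List.pyGetD B (j : Int) []
    (PySem.List.pyGetD b (j : Int) 0, PySem.List.pyGetD cell 0 0, PySem.List.pyGetD cell 1 0))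
  let st := triples.foldl
    (fun (st : PySem.Dict (Int × Int) Int × PySem.Dict (Int × Int) Int × PySem.Dict (Int × Int × Int) Int) t =>
      (st.1.insert (t.1, t.2.1) (st.1.getD (t.1, t.2.1) 0 + 1),
       st.2.1.insert (t.1, t.2.2) (st.2.1.getD (t.1, t.2.2) 0 + 1),
       st.2.2.insert t (st.2.2.getD t 0 + 1)))
    (PySem.Dict.empty, PySem.Dict.empty, PySem.Dict.empty)
  (List.range A.length).any (fun i =>
    let cell := PySem.List.pyGetD A (i : Int) []
    let v := PySem.List.pyGetD a (i : Int) 0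
    let x := PySem.List.pyGetD cell 0 0
    let y := PySem.List.pyGetD cell 1 0
    let both := st.2.2.getD (v, x, y) 0
    decide (0 < st.1.getD (v, x) 0 + st.2.1.getD (v, y) 0 - 2 * both))

-- ===== PRECONDITION & SPEC =====
-- Pre_ excludes the inputs with a cell of fewer than two coordinates or an assignment list shorter
-- than its cell list: there the Python A raises IndexError, except when the other group is empty so
-- A's loop body never runs and it returns False, while B (which indexes every cell eagerly) raises.
def Pre_conflicting (A : List (List Int)) (a : List Int) (B : List (List Int)) (b : List Int) : Prop :=
  (∀ r ∈ A, 2 ≤ r.length) ∧ (∀ r ∈ B, 2 ≤ r.length) ∧ A.length ≤ a.length ∧ B.length ≤ b.length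
instance (A : List (List Int)) (a : List Int) (B : List (List Int)) (b : List Int) : Decidable (Pre_conflicting A a B b) := by unfold Pre_conflicting; infer_instance

def pvWitness_conflicting : List (List Int) × List Int × List (List Int) × List Int :=
  ([[0, 0]], [1], [[0, 1]], [1])

def Spec_conflicting (A : List (List Int)) (a : List Int) (B : List (List Int)) (b : List Int) (out : Bool) : Prop := out = conflicting_alt A a B b
instance (A : List (List Int)) (a : List Int) (B : List (List Int)) (b : List Int) (out : Bool) : Decidable (Spec_conflicting A a B b out) := by unfold Spec_conflicting; infer_instance

-- ===== CLAIM (what is proved, stated in full; the proofs are below) =====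
def Claim_equal_conflicting : Prop := ∀ (A : List (List Int)) (a : List Int) (B : List (List Int)) (b : List Int), Dom_conflicting A a B b → Pre_conflicting A a B b → Spec_conflicting A a B b (conflicting A a B b)

-- ===== LEMMAS AND PROOFS =====

lemma pv_split (l : List (Int×Int×Int)) (s1 s2 : PySem.Dict (Int×Int) Int) (s3 : PySem.Dict (Int×Int×Int) Int) :
    l.foldl (fun (st : PySem.Dict (Int × Int) Int × PySem.Dict (Int × Int) Int × PySem.Dict (Int × Int × Int) Int) t =>
      (st.1.insert (t.1, t.2.1) (st.1.getD (t.1, t.2.1) 0 + 1),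
       st.2.1.insert (t.1, t.2.2) (st.2.1.getD (t.1, t.2.2) 0 + 1),
       st.2.2.insert t (st.2.2.getD t 0 + 1))) (s1, s2, s3)
  = (l.foldl (fun d t => d.insert (t.1,t.2.1) (d.getD (t.1,t.2.1) 0+1)) s1,
     l.foldl (fun d t => d.insert (t.1,t.2.2) (d.getD (t.1,t.2.2) 0+1)) s2,
     l.foldl (fun d t => d.insert t (d.getD t 0+1)) s3) := by
  induction l generalizing s1 s2 s3 with
  | nil => rfl
  | cons h t ih => simp only [List.foldl_cons, ih]

lemma pv_getD_keyfold {β κ : Type} [BEq κ] [LawfulBEq κ] (key : β → κ)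
    (l : List β) (d : PySem.Dict κ Int) (k : κ) :
    (l.foldl (fun d t => d.insert (key t) (d.getD (key t) 0+1)) d).getD k 0
      = d.getD k 0 + (l.countP (fun t => key t == k) : Int) := by
  induction l generalizing d with
  | nil => simp
  | cons h t ih =>
    simp only [List.foldl_cons, ih, List.countP_cons]
    by_cases hk : key h = k
    · subst hk; rw [PySem.Dict.getD_insert_self]; simp; ring
    · rw [PySem.Dict.getD_insert_of_ne _ _ _ (Ne.symm hk)]
      simp [hk]

lemma pv_countP_xor {γ : Type} (l : List γ) (p q : γ → Bool) :
    l.countP p + l.countP q = l.countP (fun x => p x != q x) + 2 * l.countP (fun x => p x && q x) := by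
  induction l with
  | nil => simp
  | cons h t ih =>
    simp only [List.countP_cons]
    cases hp : p h <;> cases hq : q h <;> simp <;> omega

lemma pv_count_any {γ : Type} (l : List γ) (p q r s : γ → Bool)
    (hpq : ∀ x ∈ l, r x = (p x && q x)) (hxor : ∀ x ∈ l, s x = (p x != q x)) :
    decide (0 < ((l.countP p : Int) + (l.countP q : Int) - 2 * (l.countP r : Int))) = l.any s := by
  have hr : l.countP r = l.countP (fun x => p x && q x) :=
    List.countP_congr (fun x hx => by rw [hpq x hx])
  have hs : l.countP s = l.countP (fun x => p x != q x) :=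
    List.countP_congr (fun x hx => by rw [hxor x hx])
  have h := pv_countP_xor l p q
  by_cases h2 : ∃ x ∈ l, s x = true
  · have hpos : 0 < l.countP s := List.countP_pos_iff.mpr h2
    rw [List.any_eq_true.mpr h2]
    exact decide_eq_true (by rw [hr]; omega)
  · have hz : l.countP s = 0 := List.countP_eq_zero.mpr (fun x hx => by
      by_contra hc; exact h2 ⟨x, hx, by simpa using hc⟩)
    rw [List.any_eq_false.mpr (fun x hx hsx => h2 ⟨x, hx, hsx⟩)]
    exact decide_eq_false (by rw [hr]; omega)


lemma pv_beq_pair (t1 t2 v x : Int) : (((t1, t2) : Int×Int) == (v, x)) = (t1 == v && t2 == x) := rfl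
lemma pv_beq_triple (t1 t2 t3 v x y : Int) :
    (((t1, t2, t3) : Int×Int×Int) == (v, x, y)) = (t1 == v && (t2 == x && t3 == y)) := rfl

lemma pv_and (t : Int×Int×Int) (v x y : Int) :
    (t == (v, x, y)) = (((t.1, t.2.1) == (v, x)) && ((t.1, t.2.2) == (v, y))) := by
  obtain ⟨t1, t2, t3⟩ := t
  rw [pv_beq_pair, pv_beq_pair, pv_beq_triple]
  generalize (t1 == v) = e1
  generalize (t2 == x) = e2
  generalize (t3 == y) = e3
  cases e1 <;> cases e2 <;> cases e3 <;> rfl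

lemma pv_body (v x y bj X Y : Int) :
    ((((bj, X) : Int×Int) == (v, x)) != (((bj, Y) : Int×Int) == (v, y)))
      = ((((x == X) != (y == Y))) && (v == bj)) := by
  rw [pv_beq_pair, pv_beq_pair,
      show (x == X) = (X == x) from Bool.beq_comm,
      show (y == Y) = (Y == y) from Bool.beq_comm,
      show (v == bj) = (bj == v) from Bool.beq_comm]
  generalize (bj == v) = c
  generalize (X == x) = p
  generalize (Y == y) = q
  cases c <;> cases p <;> cases q <;> rfl

lemma pv_count_any2 {γ : Type} (l : List γ) (p q r : γ → Bool)
    (hpq : ∀ x ∈ l, r x = (p x && q x)) :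
    decide (0 < ((l.countP p : Int) + (l.countP q : Int) - 2 * (l.countP r : Int)))
      = l.any (fun x => p x != q x) :=
  pv_count_any l p q r (fun x => p x != q x) hpq (fun _ _ => rfl)


-- ===== VERDICT (by name: the statement is the Claim_ definition above) =====
theorem conflicting_spec : Claim_equal_conflicting := by
  intro A a B b _ _
  unfold Spec_conflicting conflicting conflicting_alt
  simp only [pv_split]
  refine List.any_congr rfl (fun i => ?_)
  rw [pv_getD_keyfold (fun t : Int×Int×Int => (t.1, t.2.1)),
      pv_getD_keyfold (fun t : Int×Int×Int => (t.1, t.2.2)),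
      pv_getD_keyfold (fun t : Int×Int×Int => t)]
  simp only [PySem.Dict.getD_empty, zero_add]
  rw [pv_count_any2 _ _ _ _ (fun t _ => pv_and t _ _ _)]
  rw [List.any_map]
  refine List.any_congr rfl (fun j => ?_)
  simp only [Function.comp]
  rw [pv_body]
  rfl
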